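-- pv_equiv track=rewrite | github.com/EBosi/structural-phylogenomics-workflow | workflow/scripts/repeat_utils.py | mask_sequence
-- ===== SOURCE A (Python) =====
-- def mask_sequence(sequence, intervals, hard_masking):
--     if not intervals:
--         return sequence
--     seq_chars = list(sequence)
--     for start, end in intervals:
--         start_idx = max(0, start - 1)
--         end_idx = min(len(seq_chars), end)
--         for idx in range(start_idx, end_idx):
--             seq_chars[idx] = "N" if hard_masking else seq_chars[idx].lower()
--     return "".join(seq_chars)
-- ===== SOURCE B (Python) =====
-- def mask_sequence(sequence, intervals, hard_masking):
--     if not intervals: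
--         return sequence
--     n = len(sequence)
--     # difference array: +1 where a masked run starts, -1 one past where it ends
--     diff = [0] * (n + 1)
--     for start, end in intervals:
--         lo = max(0, start - 1)
--         hi = min(n, end)
--         if lo < hi:
--             diff[lo] += 1
--             diff[hi] -= 1
--     out = []
--     depth = 0
--     for i, c in enumerate(sequence):
--         depth += diff[i]
--         out.append(('N' if hard_masking else c.lower()) if depth > 0 else c)
--     return ''.join(out)
-- ===== Notes on version B (the rewrite author's own statement) =====
-- stated objective: alternative
-- what changed: Replaces per-interval in-place writes over a char list with a difference-array sweep: +1/-1 boundary marks per interval, then one prefix-sum pass over the whole sequence emitting masked or original characters.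
import Mathlib
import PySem

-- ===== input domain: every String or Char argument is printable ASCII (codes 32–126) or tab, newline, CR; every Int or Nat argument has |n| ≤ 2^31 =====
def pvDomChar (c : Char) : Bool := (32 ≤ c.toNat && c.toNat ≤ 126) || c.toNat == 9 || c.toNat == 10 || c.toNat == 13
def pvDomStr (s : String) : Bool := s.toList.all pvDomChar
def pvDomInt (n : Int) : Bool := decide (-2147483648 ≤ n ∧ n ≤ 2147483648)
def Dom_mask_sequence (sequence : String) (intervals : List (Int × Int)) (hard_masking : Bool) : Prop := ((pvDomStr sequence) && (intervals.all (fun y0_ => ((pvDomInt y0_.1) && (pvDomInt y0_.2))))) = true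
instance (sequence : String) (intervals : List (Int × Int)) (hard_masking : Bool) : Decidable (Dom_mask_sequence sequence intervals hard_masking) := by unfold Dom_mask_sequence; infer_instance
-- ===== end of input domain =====

-- B replaces A's per-interval in-place span rewriting with a difference-array sweep
-- (+1/-1 interval boundary marks, then one prefix-sum pass over the whole sequence): alternative algorithm.


-- ===== PORT A =====
def mask_sequence (sequence : String) (intervals : List (Int × Int)) (hard_masking : Bool) : String :=
  if intervals = [] then sequence
  else
    let seq_chars := sequence.toList
    let final := intervals.foldl (fun chars se =>
      let start_idx := max 0 (se.1 - 1)
      let end_idx := min (PySem.List.len chars) se.2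
      (PySem.List.pyRange start_idx end_idx 1).foldl
        (fun cs idx =>
          cs.set idx.toNat (if hard_masking then 'N' else PySem.Chars.lowerChar (cs.getD idx.toNat ' ')))
        chars) seq_chars
    String.mk final

-- ===== PORT B =====
def mask_sequence_alt (sequence : String) (intervals : List (Int × Int)) (hard_masking : Bool) : String :=
  if intervals = [] then sequence
  else
    let n := PySem.Str.len sequence
    let diff := intervals.foldl (fun d se =>
      let lo := max 0 (se.1 - 1)
      let hi := min n se.2
      if lo < hi then
        let d1 := d.set lo.toNat (d.getD lo.toNat 0 + 1)
        d1.set hi.toNat (d1.getD hi.toNat 0 - 1)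
      else d) (List.replicate (n.toNat + 1) (0 : Int))
    let final := (PySem.List.enumerate sequence.toList).foldl
      (fun (acc : List Char × Int) p =>
        let depth := acc.2 + diff.getD p.1.toNat 0
        (acc.1 ++ [if 0 < depth then (if hard_masking then 'N' else PySem.Chars.lowerChar p.2) else p.2],
         depth))
      ([], 0)
    String.mk final.1

-- ===== PRECONDITION & SPEC =====
def Spec_mask_sequence (sequence : String) (intervals : List (Int × Int)) (hard_masking : Bool) (out : String) : Prop := out = mask_sequence_alt sequence intervals hard_masking
instance (sequence : String) (intervals : List (Int × Int)) (hard_masking : Bool) (out : String) : Decidable (Spec_mask_sequence sequence intervals hard_masking out) := by unfold Spec_mask_sequence; infer_instance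

-- ===== CLAIM (what is proved, stated in full; the proofs are below) =====
def Claim_equal_mask_sequence : Prop := ∀ (sequence : String) (intervals : List (Int × Int)) (hard_masking : Bool), Dom_mask_sequence sequence intervals hard_masking → Spec_mask_sequence sequence intervals hard_masking (mask_sequence sequence intervals hard_masking)

-- ===== LEMMAS AND PROOFS =====

-- the per-character masking function both programs apply on masked positions
def pvF (hard : Bool) (c : Char) : Char := if hard then 'N' else PySem.Chars.lowerChar c

-- "position i is inside some (1-based, clamped) interval"
def pvCov (n : Int) (ivs : List (Int × Int)) (i : Int) : Bool :=
  ivs.any (fun p => decide (max 0 (p.1 - 1) ≤ i ∧ i < min n p.2))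

-- B's difference array, written exactly as B's first fold (zeta-reduced)
def pvDiffOf (n : Int) (ivs : List (Int × Int)) : List Int :=
  ivs.foldl (fun d se =>
    if max 0 (se.1 - 1) < min n se.2 then
      (d.set (max 0 (se.1 - 1)).toNat (d.getD (max 0 (se.1 - 1)).toNat 0 + 1)).set
        (min n se.2).toNat
        ((d.set (max 0 (se.1 - 1)).toNat (d.getD (max 0 (se.1 - 1)).toNat 0 + 1)).getD (min n se.2).toNat 0 - 1)
    else d) (List.replicate (n.toNat + 1) (0 : Int))

theorem pvLowerChar_idem (c : Char) :
    PySem.Chars.lowerChar (PySem.Chars.lowerChar c) = PySem.Chars.lowerChar c := by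
  by_cases h : ('A' ≤ c) ∧ (c ≤ 'Z')
  · have h1 : 65 ≤ c.toNat := Fin.mk_le_mk.mp h.1
    have h2 : c.toNat ≤ 90 := Fin.mk_le_mk.mp h.2
    have hval : (c.toNat + 32).isValidChar := Or.inl (by omega)
    have htn : (Char.ofNat (c.toNat + 32)).toNat = c.toNat + 32 := by
      rw [Char.toNat_ofNat, if_pos hval]
    have hnotup : ¬ (Char.ofNat (c.toNat + 32) ≤ 'Z') := by
      intro hle
      have h3 : (Char.ofNat (c.toNat + 32)).toNat ≤ ('Z').toNat := Fin.mk_le_mk.mp hle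
      have h4 : ('Z').toNat = 90 := rfl
      omega
    have hlc : PySem.Chars.lowerChar c = Char.ofNat (c.toNat + 32) := by
      simp [PySem.Chars.lowerChar, PySem.Chars.isupper, h.1, h.2]
    rw [hlc]
    simp [PySem.Chars.lowerChar, PySem.Chars.isupper, hnotup]
  · have hlc : PySem.Chars.lowerChar c = c := by
      simp only [PySem.Chars.lowerChar, PySem.Chars.isupper]
      rcases Decidable.not_and_iff_not_or_not.mp h with h' | h' <;> simp [h']
    rw [hlc, hlc]

theorem pvF_idem (hard : Bool) (c : Char) : pvF hard (pvF hard c) = pvF hard c := by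
  cases hard <;> simp [pvF, pvLowerChar_idem]

-- ----- A side -----

theorem pvInnerA_len (hard : Bool) (l : List Int) (cs : List Char) :
    (l.foldl (fun cs idx =>
      cs.set idx.toNat (if hard then 'N' else PySem.Chars.lowerChar (cs.getD idx.toNat ' '))) cs).length
      = cs.length := by
  induction l generalizing cs with
  | nil => rfl
  | cons a l ih =>
    rw [List.foldl_cons, ih]
    simp

theorem pvInnerA_get (hard : Bool) (hi : Int) :
    ∀ (m : Nat) (lo : Int) (cs : List Char), (hi - lo).toNat = m → 0 ≤ lo →
      hi ≤ (cs.length : Int) → ∀ i : Nat,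
      ((PySem.List.pyRange lo hi 1).foldl (fun cs idx =>
        cs.set idx.toNat (if hard then 'N' else PySem.Chars.lowerChar (cs.getD idx.toNat ' '))) cs)[i]?
      = if lo ≤ (i : Int) ∧ (i : Int) < hi then (cs[i]?).map (pvF hard) else cs[i]? := by
  intro m
  induction m with
  | zero =>
    intro lo cs hm h0 hlen i
    have hle : hi ≤ lo := by omega
    rw [PySem.List.pyRange_one_eq_nil hle]
    simp only [List.foldl_nil]
    have hnot : ¬ (lo ≤ (i : Int) ∧ (i : Int) < hi) := by omega
    rw [if_neg hnot]
  | succ m ih =>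
    intro lo cs hm h0 hlen i
    have hlt : lo < hi := by omega
    rw [PySem.List.pyRange_one_cons hlt]
    simp only [List.foldl_cons]
    set cs' := cs.set lo.toNat (if hard then 'N' else PySem.Chars.lowerChar (cs.getD lo.toNat ' ')) with hcs'
    have hlenset : cs'.length = cs.length := by simp [hcs']
    have hlo_lt : lo.toNat < cs.length := by omega
    have hgetD : cs.getD lo.toNat ' ' = cs[lo.toNat] := by
      rw [List.getD_eq_getElem?_getD, List.getElem?_eq_getElem hlo_lt]; rfl
    have hset_get : ∀ j : Nat, cs'[j]? = if lo.toNat = j then some (pvF hard cs[lo.toNat]) else cs[j]? := by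
      intro j
      rw [hcs', List.getElem?_set]
      by_cases hj : lo.toNat = j
      · subst hj
        rw [if_pos rfl, if_pos rfl, if_pos hlo_lt, hgetD]
        rfl
      · rw [if_neg hj, if_neg hj]
    rw [ih (lo + 1) cs' (by omega) (by omega) (by rw [hlenset]; exact hlen) i]
    by_cases hcase : lo.toNat = i
    · subst hcase
      have hnot : ¬ (lo + 1 ≤ ((lo.toNat : Nat) : Int) ∧ ((lo.toNat : Nat) : Int) < hi) := by omega
      have hcond : lo ≤ ((lo.toNat : Nat) : Int) ∧ ((lo.toNat : Nat) : Int) < hi := by omega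
      rw [if_neg hnot, if_pos hcond, hset_get, if_pos rfl,
        List.getElem?_eq_getElem hlo_lt, Option.map_some]
    · have hget : cs'[i]? = cs[i]? := by rw [hset_get i, if_neg hcase]
      rw [hget]
      have hiff : (lo + 1 ≤ (i : Int) ∧ (i : Int) < hi) ↔ (lo ≤ (i : Int) ∧ (i : Int) < hi) := by
        omega
      rw [if_congr hiff rfl rfl]

theorem pvOuterA_get (hard : Bool) :
    ∀ (ivs : List (Int × Int)) (cs : List Char) (i : Nat),
      (ivs.foldl (fun chars se =>
        (PySem.List.pyRange (max 0 (se.1 - 1)) (min (PySem.List.len chars) se.2) 1).foldl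
          (fun cs idx =>
            cs.set idx.toNat (if hard then 'N' else PySem.Chars.lowerChar (cs.getD idx.toNat ' ')))
          chars) cs)[i]?
      = if pvCov (cs.length : Int) ivs (i : Int) then (cs[i]?).map (pvF hard) else cs[i]? := by
  intro ivs
  induction ivs with
  | nil => intro cs i; simp [pvCov]
  | cons p ivs ih =>
    intro cs i
    rw [List.foldl_cons]
    set lo := max 0 (p.1 - 1) with hlo
    set hi := min (PySem.List.len cs) p.2 with hhi
    set cs' := (PySem.List.pyRange lo hi 1).foldl (fun cs idx =>
      cs.set idx.toNat (if hard then 'N' else PySem.Chars.lowerChar (cs.getD idx.toNat ' '))) cs with hcs'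
    have hlen' : cs'.length = cs.length := pvInnerA_len hard _ cs
    have hstep := pvInnerA_get hard hi (hi - lo).toNat lo cs rfl (by omega)
      (by rw [hhi]; simp [PySem.List.len]) i
    rw [← hcs'] at hstep
    have hih := ih cs' i
    rw [hlen'] at hih
    rw [hih, hstep]
    have hcovcons : pvCov (cs.length : Int) (p :: ivs) (i : Int)
        = ((decide (lo ≤ (i : Int) ∧ (i : Int) < hi)) || pvCov (cs.length : Int) ivs (i : Int)) := by
      simp [pvCov, hlo, hhi, PySem.List.len]
    rw [hcovcons]
    by_cases h1 : lo ≤ (i : Int) ∧ (i : Int) < hi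
    · by_cases h2 : pvCov (cs.length : Int) ivs (i : Int)
      · simp only [h1, decide_true, Bool.true_or, h2, if_true]
        cases cs[i]? with
        | none => rfl
        | some c => simp [pvF_idem]
      · simp [h1, h2]
    · by_cases h2 : pvCov (cs.length : Int) ivs (i : Int) <;> simp [h1, h2]

-- ----- B side -----

-- contribution of one interval to diff[j]
def pvContrib (n : Int) (p : Int × Int) (j : Nat) : Int :=
  if max 0 (p.1 - 1) < min n p.2 then
    (if (j : Int) = max 0 (p.1 - 1) then 1 else 0) + (if (j : Int) = min n p.2 then -1 else 0)
  else 0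

theorem pvDiffB_get (n : Int) (hn : 0 ≤ n) :
    ∀ (ivs : List (Int × Int)) (d : List Int), d.length = n.toNat + 1 → ∀ j : Nat,
      (ivs.foldl (fun d se =>
        if max 0 (se.1 - 1) < min n se.2 then
          (d.set (max 0 (se.1 - 1)).toNat (d.getD (max 0 (se.1 - 1)).toNat 0 + 1)).set
            (min n se.2).toNat
            ((d.set (max 0 (se.1 - 1)).toNat (d.getD (max 0 (se.1 - 1)).toNat 0 + 1)).getD (min n se.2).toNat 0 - 1)
        else d) d).getD j 0
      = d.getD j 0 + (ivs.map (fun p => pvContrib n p j)).sum := by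
  intro ivs
  induction ivs with
  | nil => intro d hd j; simp
  | cons p ivs ih =>
    intro d hd j
    rw [List.foldl_cons, List.map_cons, List.sum_cons]
    set lo := max 0 (p.1 - 1) with hlo
    set hi := min n p.2 with hhi
    by_cases hcase : lo < hi
    · have hlolt : lo.toNat < d.length := by omega
      have hhilt : hi.toNat < d.length := by omega
      have hne : lo.toNat ≠ hi.toNat := by omega
      set d1 := d.set lo.toNat (d.getD lo.toNat 0 + 1) with hd1
      set d2 := d1.set hi.toNat (d1.getD hi.toNat 0 - 1) with hd2
      have hlen1 : d1.length = d.length := by simp [hd1]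
      have hgd : ∀ (l : List Int) (i j : Nat) (v : Int), (l.set i v).getD j 0
          = if i = j ∧ i < l.length then v else l.getD j 0 := by
        intro l i j v
        rw [List.getD_eq_getElem?_getD, List.getElem?_set, List.getD_eq_getElem?_getD]
        by_cases h : i = j
        · subst h
          by_cases h2 : i < l.length
          · rw [if_pos rfl, if_pos h2, if_pos ⟨rfl, h2⟩]
            rfl
          · rw [if_pos rfl, if_neg h2, if_neg (by tauto),
              List.getElem?_eq_none_iff.mpr (by omega)]
        · rw [if_neg h, if_neg (by tauto)]
      have hstep : d2.getD j 0 = d.getD j 0 + pvContrib n p j := by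
        rw [hd2, hgd, hd1, hgd, hgd]
        simp only [List.length_set]
        have hjlo : ((j : Int) = lo) ↔ (lo.toNat = j) := by omega
        have hjhi : ((j : Int) = hi) ↔ (hi.toNat = j) := by omega
        unfold pvContrib
        rw [← hlo, ← hhi, if_pos hcase]
        by_cases h1 : lo.toNat = j <;> by_cases h2 : hi.toNat = j <;>
          simp [h1, h2, hjlo, hjhi, hlolt, hhilt, hne] <;> omega
      have hlen2 : d2.length = n.toNat + 1 := by rw [hd2, List.length_set, hlen1, hd]
      rw [if_pos hcase, ih d2 hlen2 j, hstep]
      ring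
    · rw [if_neg hcase, ih d hd j]
      unfold pvContrib
      rw [← hlo, ← hhi, if_neg hcase]
      ring

-- recursive spec of B's output pass
def pvOutSpec (hard : Bool) (diff : List Int) : List Char → Nat → Int → List Char
  | [], _, _ => []
  | c :: xs, s, d0 =>
    let d1 := d0 + diff.getD s 0
    (if 0 < d1 then pvF hard c else c) :: pvOutSpec hard diff xs (s + 1) d1

theorem pvFoldB (hard : Bool) (diff : List Int) :
    ∀ (xs : List Char) (s : Nat) (a0 : List Char) (d0 : Int),
      ((PySem.List.enumerate xs (s : Int)).foldl
        (fun (acc : List Char × Int) p =>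
          let depth := acc.2 + diff.getD p.1.toNat 0
          (acc.1 ++ [if 0 < depth then (if hard then 'N' else PySem.Chars.lowerChar p.2) else p.2],
           depth))
        (a0, d0)).1
      = a0 ++ pvOutSpec hard diff xs s d0 := by
  intro xs
  induction xs with
  | nil => intro s a0 d0; simp [PySem.List.enumerate_nil, pvOutSpec]
  | cons c xs ih =>
    intro s a0 d0
    rw [PySem.List.enumerate_cons, List.foldl_cons]
    have hc : ((s : Int) + 1) = ((s + 1 : Nat) : Int) := by push_cast; ring
    simp only [hc, ih]
    simp [pvOutSpec, pvF, Int.toNat_natCast]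

theorem pvOutSpec_get (hard : Bool) (diff : List Int) :
    ∀ (xs : List Char) (s : Nat) (d0 : Int) (i : Nat),
      (pvOutSpec hard diff xs s d0)[i]?
      = (xs[i]?).map (fun c =>
          if 0 < d0 + ((List.range (i + 1)).map (fun t => diff.getD (s + t) 0)).sum
          then pvF hard c else c) := by
  intro xs
  induction xs with
  | nil => intro s d0 i; simp [pvOutSpec]
  | cons c xs ih =>
    intro s d0 i
    cases i with
    | zero => simp [pvOutSpec, List.range_succ]
    | succ i =>
      simp only [pvOutSpec, List.getElem?_cons_succ, ih]
      cases hx : xs[i]? with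
      | none => rfl
      | some c' =>
        simp only [Option.map_some, Option.some.injEq]
        have hrange : (List.range (i + 1 + 1)).map (fun t => diff.getD (s + t) 0)
            = diff.getD s 0 :: (List.range (i + 1)).map (fun t => diff.getD (s + 1 + t) 0) := by
          rw [List.range_succ_eq_map]
          simp only [List.map_cons, List.map_map]
          congr 1
          apply List.map_congr_left
          intro a _
          simp only [Function.comp_apply]
          rw [show s + (a + 1) = s + 1 + a by omega]
        have harith : d0 + diff.getD s 0 + ((List.range (i + 1)).map (fun t => diff.getD (s + 1 + t) 0)).sum
            = d0 + ((List.range (i + 1 + 1)).map (fun t => diff.getD (s + t) 0)).sum := by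
          rw [hrange]
          simp [add_assoc]
        rw [harith]

theorem pvSum_map_neg (l : List Nat) (f : Nat → Int) :
    (l.map (fun x => -(f x))).sum = -((l.map f).sum) := by
  induction l with
  | nil => simp
  | cons a l ih => simp [ih]; ring

-- sum of one interval's contributions over positions 0..i equals its 0/1 coverage indicator
theorem pvContrib_sum (n : Int) (p : Int × Int) (i : Nat) :
    ((List.range (i + 1)).map (fun t => pvContrib n p t)).sum
      = if max 0 (p.1 - 1) ≤ (i : Int) ∧ (i : Int) < min n p.2 then 1 else 0 := by
  set lo := max 0 (p.1 - 1) with hlo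
  set hi' := min n p.2 with hhi
  by_cases hcase : lo < hi'
  · have hsum : ∀ (m : Nat) (a : Int), 0 ≤ a →
        ((List.range m).map (fun t => if ((t : Nat) : Int) = a then (1 : Int) else 0)).sum
        = if a < (m : Int) then 1 else 0 := by
      intro m
      induction m with
      | zero => intro a ha; rw [if_neg (by omega)]; simp
      | succ m ihm =>
        intro a ha
        rw [List.range_succ, List.map_append, List.sum_append, ihm a ha]
        simp only [List.map_cons, List.map_nil, List.sum_cons, List.sum_nil, add_zero]
        by_cases h1 : a < (m : Int)
        · rw [if_pos h1, if_neg (by omega), if_pos (by push_cast; omega)]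
          ring
        · by_cases h2 : ((m : Nat) : Int) = a
          · rw [if_neg h1, if_pos h2, if_pos (by push_cast; omega)]
            ring
          · rw [if_neg h1, if_neg h2, if_neg (by push_cast; omega)]
            ring
    have hsplit : ((List.range (i + 1)).map (fun t => pvContrib n p t)).sum
        = ((List.range (i + 1)).map (fun t => if ((t : Nat) : Int) = lo then (1 : Int) else 0)).sum
          + ((List.range (i + 1)).map (fun t => if ((t : Nat) : Int) = hi' then (-1 : Int) else 0)).sum := by
      rw [← PySem.List.sum_map_add_int]
      congr 1
      apply List.map_congr_left
      intro t _
      unfold pvContrib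
      rw [← hlo, ← hhi, if_pos hcase]
    have hneg : ((List.range (i + 1)).map (fun t => if ((t : Nat) : Int) = hi' then (-1 : Int) else 0)).sum
        = - ((List.range (i + 1)).map (fun t => if ((t : Nat) : Int) = hi' then (1 : Int) else 0)).sum := by
      rw [← pvSum_map_neg]
      congr 1
      apply List.map_congr_left
      intro a _
      split <;> ring
    rw [hsplit, hneg, hsum (i + 1) lo (by omega), hsum (i + 1) hi' (by omega)]
    by_cases h1 : lo ≤ (i : Int)
    · by_cases h2 : (i : Int) < hi'
      · rw [if_pos (by push_cast; omega), if_neg (by push_cast; omega), if_pos ⟨h1, h2⟩]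
        ring
      · rw [if_pos (by push_cast; omega), if_pos (by push_cast; omega), if_neg (by tauto)]
        ring
    · rw [if_neg (by push_cast; omega), if_neg (by push_cast; omega), if_neg (by tauto)]
      ring
  · have hfalse : ¬ (lo ≤ (i : Int) ∧ (i : Int) < hi') := by omega
    rw [if_neg hfalse]
    have hz : ∀ t : Nat, pvContrib n p t = 0 := by
      intro t; unfold pvContrib; rw [← hlo, ← hhi, if_neg hcase]
    simp [hz]

-- swap the two sums: total depth at i = sum over intervals of their indicators
theorem pvSum_swap (n : Int) (ivs : List (Int × Int)) (m : Nat) :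
    ((List.range m).map (fun t => (ivs.map (fun p => pvContrib n p t)).sum)).sum
      = (ivs.map (fun p => ((List.range m).map (fun t => pvContrib n p t)).sum)).sum := by
  induction ivs with
  | nil => simp
  | cons p ivs ih =>
    simp only [List.map_cons, List.sum_cons, ← ih]
    rw [← PySem.List.sum_map_add_int]

theorem pvDepth_pos_iff (n : Int) (ivs : List (Int × Int)) (i : Nat) :
    (0 < (ivs.map (fun p => ((List.range (i + 1)).map (fun t => pvContrib n p t)).sum)).sum)
      ↔ pvCov n ivs (i : Int) = true := by
  have hcongr : (ivs.map (fun p => ((List.range (i + 1)).map (fun t => pvContrib n p t)).sum))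
      = ivs.map (fun p => if (fun p : Int × Int => decide (max 0 (p.1 - 1) ≤ (i : Int) ∧ (i : Int) < min n p.2)) p = true then (1:Int) else 0) := by
    apply List.map_congr_left
    intro p _
    rw [pvContrib_sum n p i]
    simp
  rw [hcongr, PySem.List.sum_map_ite_one_zero]
  unfold pvCov
  rw [List.any_eq_true]
  constructor
  · intro h
    have hpos : 0 < ivs.countP (fun p => decide (max 0 (p.1 - 1) ≤ (i : Int) ∧ (i : Int) < min n p.2)) := by
      omega
    rw [List.countP_pos_iff] at hpos
    obtain ⟨p, hp, hpp⟩ := hpos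
    exact ⟨p, hp, hpp⟩
  · intro ⟨p, hp, hpp⟩
    have hpos : 0 < ivs.countP (fun p => decide (max 0 (p.1 - 1) ≤ (i : Int) ∧ (i : Int) < min n p.2)) :=
      List.countP_pos_iff.mpr ⟨p, hp, hpp⟩
    omega

-- ===== VERDICT (by name: the statement is the Claim_ definition above) =====
theorem mask_sequence_spec : Claim_equal_mask_sequence := by
  intro sequence intervals hard _
  unfold Spec_mask_sequence
  by_cases hivs : intervals = []
  · unfold mask_sequence mask_sequence_alt
    simp [hivs]
  · have hA : mask_sequence sequence intervals hard = String.mk (intervals.foldl (fun chars se =>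
        (PySem.List.pyRange (max 0 (se.1 - 1)) (min (PySem.List.len chars) se.2) 1).foldl
          (fun cs idx => cs.set idx.toNat (if hard then 'N' else PySem.Chars.lowerChar (cs.getD idx.toNat ' ')))
          chars) sequence.toList) := by
      unfold mask_sequence
      rw [if_neg hivs]
    have hB : mask_sequence_alt sequence intervals hard
        = String.mk (((PySem.List.enumerate sequence.toList 0).foldl
            (fun (acc : List Char × Int) p =>
              let depth := acc.2 + (pvDiffOf (PySem.Str.len sequence) intervals).getD p.1.toNat 0
              (acc.1 ++ [if 0 < depth then (if hard then 'N' else PySem.Chars.lowerChar p.2) else p.2],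
               depth))
            ([], 0)).1) := by
      unfold mask_sequence_alt pvDiffOf
      rw [if_neg hivs]
    rw [hA, hB]
    have hnlen : PySem.Str.len sequence = ((sequence.toList.length : Nat) : Int) := by simp
    rw [hnlen]
    set xs := sequence.toList with hxs
    set diff := pvDiffOf ((xs.length : Nat) : Int) intervals with hdiffd
    have hBfold := pvFoldB hard diff xs 0 [] 0
    simp only [Nat.cast_zero, List.nil_append] at hBfold
    rw [hBfold]
    apply congrArg String.mk
    apply List.ext_getElem?_iff.mpr
    intro i
    rw [pvOuterA_get hard intervals xs i, pvOutSpec_get hard diff xs 0 0 i]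
    by_cases hilen : i < xs.length
    · rw [List.getElem?_eq_getElem hilen]
      have hdiffget : ∀ t : Nat, diff.getD t 0 = (intervals.map (fun p => pvContrib ((xs.length : Nat) : Int) p t)).sum := by
        intro t
        have hstep := pvDiffB_get ((xs.length : Nat) : Int) (by positivity) intervals
          (List.replicate (((xs.length : Nat) : Int).toNat + 1) (0 : Int)) (by simp) t
        rw [hdiffd]
        unfold pvDiffOf
        rw [hstep]
        have hrep : (List.replicate (((xs.length : Nat) : Int).toNat + 1) (0 : Int)).getD t 0 = 0 := by
          rw [List.getD_eq_getElem?_getD, List.getElem?_replicate]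
          split <;> rfl
        rw [hrep]
        ring
      have hsum1 : (List.range (i + 1)).map (fun t => diff.getD (0 + t) 0)
          = (List.range (i + 1)).map (fun t => (intervals.map (fun p => pvContrib ((xs.length : Nat) : Int) p t)).sum) := by
        apply List.map_congr_left
        intro t _
        rw [Nat.zero_add, hdiffget t]
      rw [hsum1, pvSum_swap]
      set S := (intervals.map (fun p => ((List.range (i + 1)).map (fun t => pvContrib ((xs.length : Nat) : Int) p t)).sum)).sum with hS
      by_cases hcov : pvCov ((xs.length : Nat) : Int) intervals ((i : Nat) : Int) = true
      · rw [if_pos hcov, Option.map_some, Option.map_some]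
        have hpos : 0 < S := by
          rw [hS]
          exact (pvDepth_pos_iff ((xs.length : Nat) : Int) intervals i).mpr hcov
        rw [if_pos (by omega)]
      · rw [if_neg hcov, Option.map_some]
        have hnpos : ¬ (0 < S) := by
          intro hcon
          exact hcov ((pvDepth_pos_iff ((xs.length : Nat) : Int) intervals i).mp (by rw [← hS]; exact hcon))
        rw [if_neg (by omega)]
    · rw [List.getElem?_eq_none_iff.mpr (by omega)]
      simp
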